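-- pv_equiv track=rewrite | github.com/andrei-kolesnik/leetcode | Python/954.Array-of-Doubled-Pairs.py | canReorderDoubled
-- ===== SOURCE A (Python) =====
-- def canReorderDoubled(A):
--     """
--     :type A: List[int]
--     :rtype: bool
--     """
--     Ap = sorted([abs(a) for a in A])
--     while len(Ap) > 0:
--         bi = Ap[0]
--         b2i = bi * 2
--         Ap.remove(bi)
--         if b2i not in Ap:
--             return False
--         Ap.remove(b2i)
--     return True
-- ===== SOURCE B (Python) =====
-- def canReorderDoubled(A):
--     """
--     :type A: List[int]
--     :rtype: bool
--     """
--     need = {}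
--     for x in sorted(abs(a) for a in A):
--         if need.get(x, 0) > 0:
--             need[x] = need[x] - 1
--         else:
--             need[2 * x] = need.get(2 * x, 0) + 1
--     return all(v == 0 for v in need.values())
-- ===== Notes on version B (the rewrite author's own statement) =====
-- stated objective: alternative
-- what changed: Replaces A's while-loop that repeatedly rescans the remaining sorted list with list.remove and 'in' by a single pass over the sorted absolute values that maintains a dict of pending doubles and finally checks that every pending count is zero.
import Mathlib
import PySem

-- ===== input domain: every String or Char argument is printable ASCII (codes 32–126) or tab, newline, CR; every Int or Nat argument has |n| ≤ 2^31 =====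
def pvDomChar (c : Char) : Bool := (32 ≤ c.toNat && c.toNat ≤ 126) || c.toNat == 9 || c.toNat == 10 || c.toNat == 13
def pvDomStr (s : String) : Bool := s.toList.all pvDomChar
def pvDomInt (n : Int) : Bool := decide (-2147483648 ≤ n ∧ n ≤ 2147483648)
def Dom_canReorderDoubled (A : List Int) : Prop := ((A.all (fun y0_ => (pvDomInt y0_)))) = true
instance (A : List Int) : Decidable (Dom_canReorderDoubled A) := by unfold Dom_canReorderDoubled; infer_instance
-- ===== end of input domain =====

-- B replaces A's remove/membership while-loop by a single pass over the sorted absolute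
-- values with a dict of pending doubles (objective: alternative algorithm).


-- ===== PORT A =====
-- the while-loop: bi = Ap[0]; Ap.remove(bi) (first occurrence = the head); if bi*2 not in Ap: False; Ap.remove(bi*2)
def canReorderDoubled_loopA (Ap : List Int) : Bool :=
  match Ap with
  | [] => true
  | bi :: rest =>                         -- bi = Ap[0]; Ap.remove(bi) removes the first occurrence, i.e. the head
    let b2i := bi * 2
    if h : rest.contains b2i = false then false
    else canReorderDoubled_loopA ((PySem.List.remove? rest b2i).getD rest)
termination_by Ap.length
decreasing_by
  simp only [List.contains_eq_mem, Bool.not_eq_false, decide_eq_true_eq] at h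
  rw [PySem.List.remove?_eq_some_erase rest _ h]
  simpa using Nat.lt_succ_of_le (List.length_erase_le (l := rest) (a := bi * 2))

def canReorderDoubled (A : List Int) : Bool :=
  canReorderDoubled_loopA (PySem.List.sorted (A.map (fun a => |a|)) (fun x => x) false)

-- ===== PORT B =====
-- one loop iteration: consume a pending need for x, or record that a double 2*x is needed
def canReorderDoubled_stepB (need : PySem.Dict Int Int) (x : Int) : PySem.Dict Int Int :=
  if need.getD x 0 > 0 then need.insert x (need.getD x 0 - 1)
  else need.insert (2 * x) (need.getD (2 * x) 0 + 1)

def canReorderDoubled_alt (A : List Int) : Bool :=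
  let d := (PySem.List.sorted (A.map (fun a => |a|)) (fun x => x) false).foldl
             canReorderDoubled_stepB PySem.Dict.empty
  d.values.all (fun v => v == 0)

-- ===== PRECONDITION & SPEC =====
def Spec_canReorderDoubled (A : List Int) (out : Bool) : Prop := out = canReorderDoubled_alt A
instance (A : List Int) (out : Bool) : Decidable (Spec_canReorderDoubled A out) := by unfold Spec_canReorderDoubled; infer_instance

-- ===== CLAIM (what is proved, stated in full; the proofs are below) =====
def Claim_equal_canReorderDoubled : Prop := ∀ (A : List Int), Dom_canReorderDoubled A → Spec_canReorderDoubled A (canReorderDoubled A)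

-- ===== LEMMAS AND PROOFS =====

-- function-level model of B's need counter
def pvInc (f : Int → Int) (c : Int) : Int → Int := fun k => if k = c then f k + 1 else f k
def pvDec (f : Int → Int) (c : Int) : Int → Int := fun k => if k = c then f k - 1 else f k

def pvFF (f : Int → Int) : List Int → (Int → Int)
  | [] => f
  | x :: t => if f x > 0 then pvFF (pvDec f x) t else pvFF (pvInc f (2 * x)) t

def pvP (f : Int → Int) (s : List Int) : Prop := ∀ k, pvFF f s k = 0

-- function-level model of A's loop (with prepaid needs f)
def pvQ (f : Int → Int) (s : List Int) : Prop :=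
  match s with
  | [] => ∀ k, f k = 0
  | b :: t => if f b > 0 then pvQ (pvDec f b) t else ((2 * b) ∈ t ∧ pvQ f (t.erase (2 * b)))
termination_by s.length
decreasing_by
  · simp
  · simpa using Nat.lt_succ_of_le (List.length_erase_le (l := t) (a := 2 * b))

def pvNN (f : Int → Int) : Prop := ∀ k, 0 ≤ f k

theorem pvNN_dec {f : Int → Int} {c : Int} (h : pvNN f) (hc : 0 < f c) : pvNN (pvDec f c) := by
  intro k; simp only [pvDec]; split_ifs with hk
  · subst hk; omega
  · exact h k

theorem pvNN_inc {f : Int → Int} {c : Int} (h : pvNN f) : pvNN (pvInc f c) := by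
  intro k; simp only [pvInc]; split_ifs with hk
  · have := h k; omega
  · exact h k

theorem pv_dec_inc (f : Int → Int) (c : Int) : pvDec (pvInc f c) c = f := by
  funext k; simp only [pvDec, pvInc]; split_ifs <;> omega

theorem pv_inc_comm (f : Int → Int) (c d : Int) : pvInc (pvInc f c) d = pvInc (pvInc f d) c := by
  funext k; simp only [pvInc]; split_ifs <;> omega

theorem pv_dec_inc_comm {f : Int → Int} {c d : Int} (h : c ≠ d) :
    pvDec (pvInc f c) d = pvInc (pvDec f d) c := by
  funext k; simp only [pvDec, pvInc]; split_ifs <;> simp_all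

theorem pv_inc_apply_ne {f : Int → Int} {c k : Int} (h : k ≠ c) : pvInc f c k = f k := by
  simp [pvInc, h]

theorem pv_inc_apply_self (f : Int → Int) (c : Int) : pvInc f c c = f c + 1 := by
  simp [pvInc]

-- EXCHANGE: a pending need c is met iff some later element equals c, and then it may be erased up front
theorem pv_exchange : ∀ (t : List Int) (f : Int → Int) (c : Int), pvNN f →
    (pvP (pvInc f c) t ↔ c ∈ t ∧ pvP f (t.erase c)) := by
  intro t
  induction t with
  | nil =>
    intro f c hf
    constructor
    · intro h
      exfalso
      have h1 := h c
      have h2 := hf c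
      simp only [pvFF, pv_inc_apply_self] at h1
      omega
    · rintro ⟨h, -⟩; simp at h
  | cons x t' ih =>
    intro f c hf
    by_cases hxc : x = c
    · subst hxc
      have hpos : pvInc f x x > 0 := by rw [pv_inc_apply_self]; have := hf x; omega
      constructor
      · intro h
        refine ⟨List.mem_cons_self, ?_⟩
        rw [List.erase_cons_head]
        have : pvP (pvDec (pvInc f x) x) t' := by
          intro k; have hk := h k
          simp only [pvFF, if_pos hpos] at hk ⊢
          exact hk
        rwa [pv_dec_inc] at this
      · rintro ⟨-, h⟩
        rw [List.erase_cons_head] at h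
        intro k
        simp only [pvFF, if_pos hpos, pv_dec_inc]
        exact h k
    · have hval : pvInc f c x = f x := pv_inc_apply_ne hxc
      have herase : (x :: t').erase c = x :: t'.erase c := by
        rw [List.erase_cons_tail]
        simp [hxc]
      by_cases hx : f x > 0
      · have hd : pvDec (pvInc f c) x = pvInc (pvDec f x) c :=
          pv_dec_inc_comm (fun h => hxc h.symm)
        constructor
        · intro h
          have h' : pvP (pvInc (pvDec f x) c) t' := by
            intro k; have hk := h k
            simp only [pvFF, hval, if_pos hx, hd] at hk ⊢
            exact hk
          obtain ⟨hc, hp⟩ := (ih (pvDec f x) c (pvNN_dec hf hx)).1 h'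
          refine ⟨List.mem_cons_of_mem _ hc, ?_⟩
          rw [herase]
          intro k
          simp only [pvFF, if_pos hx]
          exact hp k
        · rintro ⟨hc, h⟩
          have hc' : c ∈ t' := by
            rcases List.mem_cons.1 hc with h1 | h1
            · exact absurd h1.symm hxc
            · exact h1
          rw [herase] at h
          have h' : pvP (pvDec f x) (t'.erase c) := by
            intro k; have hk := h k
            simp only [pvFF, if_pos hx] at hk ⊢
            exact hk
          have := (ih (pvDec f x) c (pvNN_dec hf hx)).2 ⟨hc', h'⟩
          intro k
          simp only [pvFF, hval, if_pos hx, hd]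
          exact this k
      · have hcomm : pvInc (pvInc f c) (2 * x) = pvInc (pvInc f (2 * x)) c :=
          pv_inc_comm f c (2 * x)
        constructor
        · intro h
          have h' : pvP (pvInc (pvInc f (2 * x)) c) t' := by
            intro k; have hk := h k
            simp only [pvFF, hval, if_neg hx, hcomm] at hk ⊢
            exact hk
          obtain ⟨hc, hp⟩ := (ih (pvInc f (2 * x)) c (pvNN_inc hf)).1 h'
          refine ⟨List.mem_cons_of_mem _ hc, ?_⟩
          rw [herase]
          intro k
          simp only [pvFF, if_neg hx]
          exact hp k
        · rintro ⟨hc, h⟩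
          have hc' : c ∈ t' := by
            rcases List.mem_cons.1 hc with h1 | h1
            · exact absurd h1.symm hxc
            · exact h1
          rw [herase] at h
          have h' : pvP (pvInc f (2 * x)) (t'.erase c) := by
            intro k; have hk := h k
            simp only [pvFF, if_neg hx] at hk ⊢
            exact hk
          have := (ih (pvInc f (2 * x)) c (pvNN_inc hf)).2 ⟨hc', h'⟩
          intro k
          simp only [pvFF, hval, if_neg hx, hcomm]
          exact this k

theorem pv_P_iff_Q (s : List Int) (f : Int → Int) (hf : pvNN f) : pvP f s ↔ pvQ f s := by
  match s with
  | [] => simp [pvP, pvFF, pvQ]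
  | b :: t =>
    by_cases hb : f b > 0
    · have h1 : pvP f (b :: t) ↔ pvP (pvDec f b) t := by
        constructor
        · intro h k; have hk := h k; simp only [pvFF, if_pos hb] at hk; exact hk
        · intro h k; have hk := h k; simp only [pvFF, if_pos hb]; exact hk
      rw [h1, pv_P_iff_Q t (pvDec f b) (pvNN_dec hf hb)]
      simp [pvQ, hb]
    · have h1 : pvP f (b :: t) ↔ pvP (pvInc f (2 * b)) t := by
        constructor
        · intro h k; have hk := h k; simp only [pvFF, if_neg hb] at hk; exact hk
        · intro h k; have hk := h k; simp only [pvFF, if_neg hb]; exact hk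
      rw [h1, pv_exchange t f (2 * b) hf]
      unfold pvQ
      rw [if_neg hb]
      rw [pv_P_iff_Q (t.erase (2 * b)) f hf]
termination_by s.length
decreasing_by
  · simp
  · simpa using Nat.lt_succ_of_le (List.length_erase_le (l := t) (a := 2 * b))

-- A's loop computes pvQ with no prepaid needs
theorem pv_loopA_iff_Q (s : List Int) :
    canReorderDoubled_loopA s = true ↔ pvQ (fun _ => 0) s := by
  match s with
  | [] => simp [canReorderDoubled_loopA, pvQ]
  | bi :: rest =>
    unfold canReorderDoubled_loopA pvQ
    by_cases h : (2 * bi) ∈ rest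
    · have hm : bi * 2 ∈ rest := by rwa [mul_comm]
      rw [dif_neg (by simp [List.contains_eq_mem, hm])]
      rw [PySem.List.remove?_eq_some_erase rest _ hm]
      simp only [Option.getD_some, if_neg (by omega : ¬ (0:Int) > 0)]
      rw [pv_loopA_iff_Q (rest.erase (bi * 2))]
      rw [mul_comm bi 2]
      simp [h]
    · have hm : bi * 2 ∉ rest := by rwa [mul_comm]
      rw [dif_pos (by simp [List.contains_eq_mem, hm])]
      simp only [if_neg (by omega : ¬ (0:Int) > 0)]
      simp [h]
termination_by s.length
decreasing_by
  simpa using Nat.lt_succ_of_le (List.length_erase_le (l := rest) (a := bi * 2))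

-- B's dict loop computes pvFF, pointwise
theorem pv_sim : ∀ (s : List Int) (d : PySem.Dict Int Int) (f : Int → Int),
    (∀ k, d.getD k 0 = f k) → ∀ k, (s.foldl canReorderDoubled_stepB d).getD k 0 = pvFF f s k := by
  intro s
  induction s with
  | nil => intro d f h k; simpa [pvFF] using h k
  | cons x t ih =>
    intro d f h k
    simp only [List.foldl_cons, canReorderDoubled_stepB, pvFF, h x]
    by_cases hx : f x > 0
    · rw [if_pos hx, if_pos hx]
      refine ih _ _ ?_ k
      intro j
      rw [PySem.Dict.getD_insert]
      simp only [pvDec, h]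
      split_ifs <;> simp_all
    · rw [if_neg hx, if_neg hx]
      refine ih _ _ ?_ k
      intro j
      rw [PySem.Dict.getD_insert]
      simp only [pvInc, h]
      split_ifs <;> simp_all

theorem pv_keys_nodup : ∀ (s : List Int) (d : PySem.Dict Int Int), d.keys.Nodup →
    (s.foldl canReorderDoubled_stepB d).keys.Nodup := by
  intro s
  induction s with
  | nil => intro d h; exact h
  | cons x t ih =>
    intro d h
    simp only [List.foldl_cons, canReorderDoubled_stepB]
    split_ifs <;> exact ih _ (PySem.Dict.nodup_keys_insert _ _ _ h)

theorem pv_allzero (d : PySem.Dict Int Int) (hnd : d.keys.Nodup) :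
    (d.values.all (fun v => v == 0) = true ↔ ∀ k, d.getD k 0 = 0) := by
  rw [PySem.Dict.values_eq_map_keys d hnd 0]
  simp only [List.all_map, List.all_eq_true, Function.comp, beq_iff_eq]
  constructor
  · intro h k
    by_cases hk : k ∈ d.keys
    · exact h k hk
    · rcases hg : d.get? k with _ | v
      · rw [PySem.Dict.getD_eq_get?_getD, hg]; rfl
      · exfalso
        have hi := PySem.Dict.mem_items_of_get?_eq_some d hg
        exact hk (by simp only [PySem.Dict.keys, List.mem_map]; exact ⟨(k, v), hi, rfl⟩)
  · intro h k _; exact h k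

-- ===== VERDICT (by name: the statement is the Claim_ definition above) =====
theorem canReorderDoubled_spec : Claim_equal_canReorderDoubled := by
  intro A _
  unfold Spec_canReorderDoubled canReorderDoubled canReorderDoubled_alt
  set s := PySem.List.sorted (A.map (fun a => |a|)) (fun x => x) false with hs
  rw [Bool.eq_iff_iff]
  rw [pv_loopA_iff_Q s]
  rw [pv_allzero _ (pv_keys_nodup s PySem.Dict.empty PySem.Dict.nodup_keys_empty)]
  have hsim : ∀ k, (s.foldl canReorderDoubled_stepB PySem.Dict.empty).getD k 0
      = pvFF (fun _ => 0) s k := by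
    refine pv_sim s PySem.Dict.empty (fun _ => 0) ?_
    intro k; simp [PySem.Dict.getD_empty]
  rw [← pv_P_iff_Q s (fun _ => 0) (fun _ => le_refl 0)]
  constructor
  · intro h k; rw [hsim k]; exact h k
  · intro h k; rw [← hsim k]; exact h k
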